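-- pv_equiv track=rewrite | github.com/Nghia03092004/nghia03092004.github.io | project_euler/problem_665/solution.py | compute_grundy
-- ===== SOURCE A (Python) =====
-- def compute_grundy(N, allowed_ks=None):
--     """Compute Grundy values for pile sizes 0..N.
--
--     Default move: from pile n, can remove floor(n/k) for k=2,3,...
--     (leaving n - floor(n/k) stones).
--     """
--     grundy = [0] * (N + 1)
--
--     for n in range(1, N + 1):
--         reachable = set()
--         # Can remove floor(n/k) stones for k >= 2
--         seen_removals = set()
--         for k in range(2, n + 1):
--             removal = n // k
--             if removal == 0:
--                 break
--             if removal not in seen_removals: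
--                 seen_removals.add(removal)
--                 new_size = n - removal
--                 reachable.add(grundy[new_size])
--         # Also can remove all (k=1)
--         reachable.add(grundy[0])
--
--         # Compute mex
--         mex = 0
--         while mex in reachable:
--             mex += 1
--         grundy[n] = mex
--
--     return grundy
-- ===== SOURCE B (Python) =====
-- def compute_grundy(N, allowed_ks=None):
--     """Compute Grundy values for pile sizes 0..N.
--
--     Same game as A, but: (1) the distinct removal sizes floor(n/k), k >= 2,
--     are collected with divisor-block jumps (O(sqrt n) blocks per n) instead
--     of scanning every k in 2..n, and (2) the mex is found by one scan over
--     the sorted set of reachable Grundy values instead of repeated membership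
--     tests.
--     """
--     grundy = [0] * (N + 1)
--
--     for n in range(1, N + 1):
--         qs = []
--         k = 2
--         while k <= n:
--             q = n // k
--             qs.append(q)
--             k = n // q + 1  # first k giving a smaller quotient
--
--         vals = sorted(set([grundy[0]] + [grundy[n - q] for q in qs]))
--         mex = 0
--         for v in vals:
--             if v == mex:
--                 mex += 1
--             elif v > mex:
--                 break
--         grundy[n] = mex
--
--     return grundy
-- ===== Notes on version B (the rewrite author's own statement) =====
-- stated objective: faster
-- what changed: Replaces A's inner scan over every k in 2..n with a seen-set by divisor-block jumps collecting the O(sqrt n) distinct quotients into a list, and replaces A's 'while mex in reachable' membership loop by a single scan over the sorted set of reachable Grundy values.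
import Mathlib
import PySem

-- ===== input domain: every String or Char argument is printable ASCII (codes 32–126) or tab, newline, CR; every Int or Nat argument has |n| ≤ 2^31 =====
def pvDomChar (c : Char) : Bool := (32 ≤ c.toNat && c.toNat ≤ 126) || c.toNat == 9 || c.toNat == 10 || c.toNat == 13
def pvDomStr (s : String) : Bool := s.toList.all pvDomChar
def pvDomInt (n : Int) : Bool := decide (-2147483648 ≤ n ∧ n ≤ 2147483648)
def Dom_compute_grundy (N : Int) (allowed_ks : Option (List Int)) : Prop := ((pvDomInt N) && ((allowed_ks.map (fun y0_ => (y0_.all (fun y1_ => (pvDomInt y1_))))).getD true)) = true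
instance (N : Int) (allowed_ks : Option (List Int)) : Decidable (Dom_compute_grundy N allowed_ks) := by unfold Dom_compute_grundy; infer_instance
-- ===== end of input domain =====

-- B collects the distinct removal sizes floor(n/k) by divisor-block jumps and finds the mex
-- by one scan over the sorted set of reachable values; objective: faster (asymptotic).
-- The parameter allowed_ks is unused by A (dead parameter); both implementations ignore it.

-- ===== PORT A =====
-- mex = 0; while mex in reachable: mex += 1   (fuel reachable.length+1 is always enough:
-- the least absent value is ≤ the number of elements)
def pvMex (reach : List Int) (mex : Int) : Nat → Int
  | 0 => mex
  | fuel+1 => if mex ∈ reach then pvMex reach (mex+1) fuel else mex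

-- A's inner for-loop over ks = range(2, n+1), with break on removal == 0
def pvAInner (grundy : List Int) (n : Int) (ks : List Int)
    (seen reach : PySem.Set Int) : PySem.Set Int × PySem.Set Int :=
  match ks with
  | [] => (seen, reach)
  | k :: rest =>
    let removal := PySem.Int.floordiv n k
    if removal = 0 then (seen, reach)   -- break
    else if removal ∈ seen then pvAInner grundy n rest seen reach
    else pvAInner grundy n rest (seen.add removal)
           (reach.add (PySem.List.pyGetD grundy (n - removal) 0))

def pvStepA (grundy : List Int) (n : Int) : List Int :=
  let reach := ((pvAInner grundy n (PySem.List.pyRange 2 (n+1) 1) PySem.Set.empty PySem.Set.empty).2).add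
                 (PySem.List.pyGetD grundy 0 0)
  PySem.List.pySetD grundy n (pvMex reach 0 (reach.length + 1))

def compute_grundy (N : Int) (allowed_ks : Option (List Int)) : List Int :=
  (PySem.List.pyRange 1 (N+1) 1).foldl pvStepA (List.replicate (N+1).toNat 0)

-- ===== PORT B =====
-- B's 'while k <= n' collecting the quotients n//k; fuel (n-1).toNat is always enough since
-- k starts at 2 and strictly increases each iteration until it exceeds n
def pvQuotients (n k : Int) : Nat → List Int
  | 0 => []
  | fuel+1 =>
    if k ≤ n then
      let q := PySem.Int.floordiv n k
      q :: pvQuotients n (PySem.Int.floordiv n q + 1) fuel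
    else []

-- for v in vals: if v == mex: mex += 1; elif v > mex: break
def pvScanMex : List Int → Int → Int
  | [], mex => mex
  | v :: rest, mex =>
    if v = mex then pvScanMex rest (mex + 1)
    else if mex < v then mex
    else pvScanMex rest mex

def pvStepB (grundy : List Int) (n : Int) : List Int :=
  let qs := pvQuotients n 2 ((n-1).toNat)
  let vals := PySem.List.sorted
      (PySem.Set.ofList (PySem.List.pyGetD grundy 0 0 ::
        qs.map (fun q => PySem.List.pyGetD grundy (n - q) 0))) (fun x => x) false
  PySem.List.pySetD grundy n (pvScanMex vals 0)

def compute_grundy_alt (N : Int) (allowed_ks : Option (List Int)) : List Int :=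
  (PySem.List.pyRange 1 (N+1) 1).foldl pvStepB (List.replicate (N+1).toNat 0)

-- ===== PRECONDITION & SPEC =====
def Spec_compute_grundy (N : Int) (allowed_ks : Option (List Int)) (out : List Int) : Prop := out = compute_grundy_alt N allowed_ks
instance (N : Int) (allowed_ks : Option (List Int)) (out : List Int) : Decidable (Spec_compute_grundy N allowed_ks out) := by unfold Spec_compute_grundy; infer_instance

-- ===== CLAIM (what is proved, stated in full; the proofs are below) =====
def Claim_equal_compute_grundy : Prop := ∀ (N : Int) (allowed_ks : Option (List Int)), Dom_compute_grundy N allowed_ks → Spec_compute_grundy N allowed_ks (compute_grundy N allowed_ks)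

-- ===== LEMMAS AND PROOFS =====

-- for 0 < k ≤ n, the quotient q = n//k is at least 1
theorem pv_q_pos {n k : Int} (hk : 0 < k) (hkn : k ≤ n) : 1 ≤ PySem.Int.floordiv n k :=
  (PySem.Int.le_floordiv_iff_mul_le hk).2 (by omega)

-- k stays inside its own quotient block: k ≤ n // (n // k)
theorem pv_k_le {n k : Int} (hk : 0 < k) (hkn : k ≤ n) :
    k ≤ PySem.Int.floordiv n (PySem.Int.floordiv n k) := by
  have hq := pv_q_pos hk hkn
  apply (PySem.Int.le_floordiv_iff_mul_le (by omega)).2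
  have h := (PySem.Int.le_floordiv_iff_mul_le hk).1 (le_refl (PySem.Int.floordiv n k))
  calc k * PySem.Int.floordiv n k = PySem.Int.floordiv n k * k := mul_comm _ _
    _ ≤ n := h

-- the quotient is constant on the block [k, n // (n // k)]
theorem pv_const {n k k' : Int} (hk : 0 < k) (hkn : k ≤ n) (h1 : k ≤ k')
    (h2 : k' ≤ PySem.Int.floordiv n (PySem.Int.floordiv n k)) :
    PySem.Int.floordiv n k' = PySem.Int.floordiv n k := by
  have hq := pv_q_pos hk hkn
  have hk' : 0 < k' := by omega
  have upper : PySem.Int.floordiv n k' < PySem.Int.floordiv n k + 1 := by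
    apply (PySem.Int.floordiv_lt_iff_lt_mul hk').2
    have h3 : n < (PySem.Int.floordiv n k + 1) * k :=
      (PySem.Int.floordiv_lt_iff_lt_mul hk).1 (by omega)
    have h4 : (PySem.Int.floordiv n k + 1) * k ≤ (PySem.Int.floordiv n k + 1) * k' :=
      mul_le_mul_of_nonneg_left h1 (by omega)
    omega
  have lower : PySem.Int.floordiv n k ≤ PySem.Int.floordiv n k' := by
    apply (PySem.Int.le_floordiv_iff_mul_le hk').2
    have h5 : k' * PySem.Int.floordiv n k ≤ n := (PySem.Int.le_floordiv_iff_mul_le hq).1 h2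
    calc PySem.Int.floordiv n k * k' = k' * PySem.Int.floordiv n k := mul_comm _ _
      _ ≤ n := h5
  omega

-- membership in the set built by A's inner loop
theorem pvAInner_mem (g : List Int) (n : Int) :
    ∀ (ks : List Int) (seen reach : PySem.Set Int),
      (∀ k ∈ ks, 1 ≤ PySem.Int.floordiv n k) →
      (∀ r ∈ seen, PySem.List.pyGetD g (n - r) 0 ∈ reach) →
      ∀ x, x ∈ (pvAInner g n ks seen reach).2 ↔
        x ∈ reach ∨ ∃ k ∈ ks, x = PySem.List.pyGetD g (n - PySem.Int.floordiv n k) 0 := by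
  intro ks
  induction ks with
  | nil => intro seen reach _ _ x; simp [pvAInner]
  | cons k rest ih =>
    intro seen reach hbreak hinv x
    have hk1 : 1 ≤ PySem.Int.floordiv n k := hbreak k (List.mem_cons_self)
    have hrest : ∀ k' ∈ rest, 1 ≤ PySem.Int.floordiv n k' :=
      fun k' hk' => hbreak k' (List.mem_cons_of_mem _ hk')
    by_cases hs : PySem.Int.floordiv n k ∈ seen
    · rw [show pvAInner g n (k :: rest) seen reach = pvAInner g n rest seen reach by
        simp [pvAInner, hs]; omega]
      rw [ih seen reach hrest hinv x]
      constructor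
      · rintro (hx | ⟨k', hk', hxe⟩)
        · exact Or.inl hx
        · exact Or.inr ⟨k', List.mem_cons_of_mem _ hk', hxe⟩
      · rintro (hx | ⟨k', hk', hxe⟩)
        · exact Or.inl hx
        · rcases List.mem_cons.1 hk' with h | h
          · subst h; exact Or.inl (hxe ▸ hinv _ hs)
          · exact Or.inr ⟨k', h, hxe⟩
    · rw [show pvAInner g n (k :: rest) seen reach
          = pvAInner g n rest (seen.add (PySem.Int.floordiv n k))
              (reach.add (PySem.List.pyGetD g (n - PySem.Int.floordiv n k) 0)) by
        simp [pvAInner, hs]; omega]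
      rw [ih _ _ hrest (by
        intro r hr
        rcases (PySem.Set.mem_add seen _ r).1 hr with h | h
        · exact (PySem.Set.mem_add reach _ _).2 (Or.inl (hinv r h))
        · subst h; exact (PySem.Set.mem_add reach _ _).2 (Or.inr rfl)) x]
      rw [PySem.Set.mem_add]
      constructor
      · rintro ((hx | hx) | ⟨k', hk', hxe⟩)
        · exact Or.inl hx
        · exact Or.inr ⟨k, List.mem_cons_self, hx⟩
        · exact Or.inr ⟨k', List.mem_cons_of_mem _ hk', hxe⟩
      · rintro (hx | ⟨k', hk', hxe⟩)
        · exact Or.inl (Or.inl hx)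
        · rcases List.mem_cons.1 hk' with h | h
          · subst h; exact Or.inl (Or.inr hxe)
          · exact Or.inr ⟨k', h, hxe⟩

-- the quotient list built by B's block loop (fuel covers the remaining k-range)
theorem pvQuotients_mem (n : Int) :
    ∀ (fuel : Nat) (k : Int), 1 ≤ k → (n + 1 - k).toNat ≤ fuel →
      ∀ x, x ∈ pvQuotients n k fuel ↔
        ∃ k', k ≤ k' ∧ k' ≤ n ∧ x = PySem.Int.floordiv n k' := by
  intro fuel
  induction fuel with
  | zero =>
    intro k hk hfuel x
    have : n < k := by omega
    simp only [pvQuotients, List.not_mem_nil, false_iff]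
    rintro ⟨k', h1, h2, _⟩
    omega
  | succ f ih =>
    intro k hk hfuel x
    by_cases hkn : k ≤ n
    · have hq : 1 ≤ PySem.Int.floordiv n k := pv_q_pos (by omega) hkn
      have hkle : k ≤ PySem.Int.floordiv n (PySem.Int.floordiv n k) := pv_k_le (by omega) hkn
      rw [show pvQuotients n k (f+1)
          = PySem.Int.floordiv n k
            :: pvQuotients n (PySem.Int.floordiv n (PySem.Int.floordiv n k) + 1) f by
        simp [pvQuotients, hkn]]
      rw [List.mem_cons, ih _ (by omega) (by omega) x]
      constructor
      · rintro (hx | ⟨k', h1, h2, hxe⟩)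
        · exact ⟨k, le_refl k, hkn, hx⟩
        · exact ⟨k', by omega, h2, hxe⟩
      · rintro ⟨k', h1, h2, hxe⟩
        by_cases hblk : k' ≤ PySem.Int.floordiv n (PySem.Int.floordiv n k)
        · exact Or.inl (by rw [hxe, pv_const (by omega) hkn h1 hblk])
        · exact Or.inr ⟨k', by omega, h2, hxe⟩
    · rw [show pvQuotients n k (f+1) = [] by simp [pvQuotients, hkn]]
      simp only [List.not_mem_nil, false_iff]
      rintro ⟨k', h1, h2, _⟩
      omega

-- pvMex finds the least value ≥ m absent from reach (fuel exceeding the relevant count)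
theorem pvMex_spec (R : List Int) :
    ∀ (fuel : Nat) (m : Int), (R.filter (fun x => decide (m ≤ x))).length < fuel →
      m ≤ pvMex R m fuel ∧ pvMex R m fuel ∉ R ∧
        ∀ j, m ≤ j → j < pvMex R m fuel → j ∈ R := by
  intro fuel
  induction fuel with
  | zero => intro m h; omega
  | succ f ih =>
    intro m hlen
    by_cases hm : m ∈ R
    · have hsub : R.filter (fun x => decide (m + 1 ≤ x))
          = (R.filter (fun x => decide (m ≤ x))).filter (fun x => decide (m + 1 ≤ x)) := by
        rw [List.filter_filter]
        apply List.filter_congr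
        intro x _
        by_cases h : m + 1 ≤ x
        · simp [h]; omega
        · simp [h]
      have hstrict : (R.filter (fun x => decide (m + 1 ≤ x))).length
          < (R.filter (fun x => decide (m ≤ x))).length := by
        rw [hsub]
        apply List.length_filter_lt_length_iff_exists.2
        exact ⟨m, List.mem_filter.2 ⟨hm, by simp⟩, by simp⟩
      have hrec := ih (m+1) (by omega)
      rw [show pvMex R m (f+1) = pvMex R (m+1) f by simp [pvMex, hm]]
      refine ⟨by omega, hrec.2.1, ?_⟩
      intro j hj1 hj2
      by_cases hje : j = m
      · exact hje ▸ hm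
      · exact hrec.2.2 j (by omega) hj2
    · rw [show pvMex R m (f+1) = m by simp [pvMex, hm]]
      exact ⟨le_refl m, hm, by intro j h1 h2; omega⟩

-- pvScanMex on a strictly increasing list finds the least value ≥ m absent from it
theorem pvScanMex_spec :
    ∀ (vals : List Int), vals.Pairwise (· < ·) → ∀ (m : Int),
      m ≤ pvScanMex vals m ∧ pvScanMex vals m ∉ vals ∧
        ∀ j, m ≤ j → j < pvScanMex vals m → j ∈ vals := by
  intro vals
  induction vals with
  | nil => intro _ m; exact ⟨le_refl m, by simp, by intro j h1 h2; simp [pvScanMex] at h2; omega⟩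
  | cons v rest ih =>
    intro hp m
    have hrest : rest.Pairwise (· < ·) := (List.pairwise_cons.1 hp).2
    have hvlt : ∀ w ∈ rest, v < w := (List.pairwise_cons.1 hp).1
    by_cases h1 : v = m
    · rw [show pvScanMex (v :: rest) m = pvScanMex rest (m+1) by simp [pvScanMex, h1]]
      have hrec := ih hrest (m+1)
      refine ⟨by omega, ?_, ?_⟩
      · intro hmem
        rcases List.mem_cons.1 hmem with h | h
        · subst h1; omega
        · exact hrec.2.1 h
      · intro j hj1 hj2
        by_cases hje : j = m
        · exact hje ▸ h1 ▸ List.mem_cons_self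
        · exact List.mem_cons_of_mem _ (hrec.2.2 j (by omega) hj2)
    · by_cases h2 : m < v
      · rw [show pvScanMex (v :: rest) m = m by simp [pvScanMex, h1, h2]]
        refine ⟨le_refl m, ?_, by intro j hj1 hj2; omega⟩
        intro hmem
        rcases List.mem_cons.1 hmem with h | h
        · omega
        · have := hvlt m h; omega
      · rw [show pvScanMex (v :: rest) m = pvScanMex rest m by simp [pvScanMex, h1, h2]]
        have hrec := ih hrest m
        refine ⟨hrec.1, ?_, fun j hj1 hj2 => List.mem_cons_of_mem _ (hrec.2.2 j hj1 hj2)⟩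
        intro hmem
        rcases List.mem_cons.1 hmem with h | h
        · omega
        · exact hrec.2.1 h

-- per-iteration equality of the two loop bodies
theorem pvStep_eq (g : List Int) (n : Int) (hn : 1 ≤ n) : pvStepA g n = pvStepB g n := by
  unfold pvStepA pvStepB
  set R := ((pvAInner g n (PySem.List.pyRange 2 (n+1) 1) PySem.Set.empty
      PySem.Set.empty).2).add (PySem.List.pyGetD g 0 0) with hRdef
  set qs := pvQuotients n 2 ((n-1).toNat) with hqsdef
  set vals := PySem.List.sorted
      (PySem.Set.ofList (PySem.List.pyGetD g 0 0 ::
        qs.map (fun q => PySem.List.pyGetD g (n - q) 0))) (fun x => x) false with hvalsdef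
  -- the two collections have the same members
  have hmem : ∀ x, x ∈ R ↔ x ∈ vals := by
    intro x
    rw [hRdef, PySem.Set.mem_add,
        pvAInner_mem g n (PySem.List.pyRange 2 (n+1) 1) PySem.Set.empty PySem.Set.empty
          (by
            intro k hk
            rw [PySem.List.mem_pyRange_one] at hk
            exact pv_q_pos (by omega) (by omega))
          (by intro r hr; simp [PySem.Set.empty] at hr) x,
        hvalsdef, PySem.List.mem_sorted, PySem.Set.mem_ofList, List.mem_cons, List.mem_map]
    simp only [PySem.Set.empty, List.not_mem_nil, false_or]
    constructor
    · rintro (⟨k, hk, hxe⟩ | hx)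
      · rw [PySem.List.mem_pyRange_one] at hk
        refine Or.inr ⟨PySem.Int.floordiv n k, ?_, hxe.symm⟩
        rw [hqsdef, pvQuotients_mem n ((n-1).toNat) 2 (by omega) (by omega)]
        exact ⟨k, by omega, by omega, rfl⟩
      · exact Or.inl hx
    · rintro (hx | ⟨q, hq, hxe⟩)
      · exact Or.inr hx
      · rw [hqsdef, pvQuotients_mem n ((n-1).toNat) 2 (by omega) (by omega)] at hq
        obtain ⟨k, h1, h2, hqe⟩ := hq
        exact Or.inl ⟨k, PySem.List.mem_pyRange_one.2 ⟨h1, by omega⟩, by rw [← hxe, hqe]⟩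
  have hvp : vals.Pairwise (· < ·) := PySem.List.sorted_ofList_pairwise_lt _
  -- both mex computations give the least nonnegative value absent from the common set
  have hA := pvMex_spec R (R.length + 1) 0
    (by have := List.length_filter_le (fun x => decide ((0:Int) ≤ x)) R; omega)
  have hB := pvScanMex_spec vals hvp 0
  have : pvMex R 0 (R.length + 1) = pvScanMex vals 0 := by
    rcases lt_trichotomy (pvMex R 0 (R.length + 1)) (pvScanMex vals 0) with h | h | h
    · exact absurd ((hmem _).2 (hB.2.2 _ hA.1 h)) hA.2.1
    · exact h
    · exact absurd ((hmem _).1 (hA.2.2 _ hB.1 h)) hB.2.1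
  exact congrArg (PySem.List.pySetD g n) this

-- ===== VERDICT (by name: the statement is the Claim_ definition above) =====
theorem compute_grundy_spec : Claim_equal_compute_grundy := by
  intro N allowed_ks _
  unfold Spec_compute_grundy compute_grundy compute_grundy_alt
  apply PySem.List.foldl_congr_mem
  intro acc n hn
  rw [PySem.List.mem_pyRange_one] at hn
  exact pvStep_eq acc n (by omega)
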